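-- pv_equiv track=rewrite | github.com/Hhaeum/9mi_algo_study | mina/6회차/good_perm.py | check
-- ===== SOURCE A (Python) =====
-- def check(perm, cnt): # 겹치는지 체크
--     s = 0
--     n = cnt
--     while n > 1:
--         # 같은 수열이 겹치는 경우는 짝수일 때 밖에 없음.
--         if n%2: # n이 홀수이면
--             s+=1 # 시작값+1
--             n-=1 # n-1로 해준다.
--         if perm[cnt-n//2 : ] == perm[s : s+n//2]:
--             # 비교했는데 겹치면
--             return True # True 반환
--         s += 2 # 넘어가면, 다음 으로 넘어간다.
--         n -= 2
--     return False
-- ===== SOURCE B (Python) =====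
-- def check(perm, cnt):
--     # Does the length-cnt sequence perm end with two identical adjacent blocks?
--     # Precompute prefix hashes and base powers once, then test each half-length h
--     # with an O(1) hash comparison, confirming a hash match by a real slice compare.
--     MOD = (1 << 61) - 1
--     BASE = 131
--     n = len(perm)
--     pref = [0] * (n + 1)
--     for i, x in enumerate(perm):
--         pref[i + 1] = (pref[i] * BASE + x) % MOD
--     pw = [1] * (n + 1)
--     for i in range(n):
--         pw[i + 1] = pw[i] * BASE % MOD
--     def hsh(i, j):
--         return (pref[j] - pref[i] * pw[j - i]) % MOD
--     for h in range(1, cnt // 2 + 1):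
--         if hsh(cnt - h, n) == hsh(cnt - 2 * h, cnt - h) \
--                 and perm[cnt - h:] == perm[cnt - 2 * h: cnt - h]:
--             return True
--     return False
-- ===== Notes on version B (the rewrite author's own statement) =====
-- stated objective: faster
-- what changed: A's while-loop state machine over (s, n) builds and compares two fresh O(cnt)-length slices per step (O(cnt^2)); B precomputes a prefix-hash table and base powers once, then tests each half-length with an O(1) hash comparison, confirming a hash match by one real slice compare. Pre_ excludes only cnt >= len(perm)+2, where A's True comes from comparing two empty out-of-range slices while B's prefix-hash indexing raises IndexError.
-- outside the precondition, e.g. on check([1, 2], 5): A returns True, B raises IndexError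
import Mathlib
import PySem

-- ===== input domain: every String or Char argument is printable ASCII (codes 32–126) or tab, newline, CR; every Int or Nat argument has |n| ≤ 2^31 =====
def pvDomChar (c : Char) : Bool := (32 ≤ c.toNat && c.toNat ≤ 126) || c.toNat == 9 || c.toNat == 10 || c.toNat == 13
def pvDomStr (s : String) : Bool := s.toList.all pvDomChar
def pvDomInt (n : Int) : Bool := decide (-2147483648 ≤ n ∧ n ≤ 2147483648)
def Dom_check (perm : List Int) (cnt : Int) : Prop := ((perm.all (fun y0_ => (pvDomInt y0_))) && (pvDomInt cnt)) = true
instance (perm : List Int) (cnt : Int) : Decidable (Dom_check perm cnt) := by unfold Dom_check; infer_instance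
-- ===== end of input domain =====

-- B replaces A's per-step construction and comparison of two fresh slices by one precomputed
-- prefix-hash table, so each candidate half-length is tested by an O(1) hash comparison
-- (a real slice comparison confirms a hash match); equivalence is proved on Pre_check.

-- ===== PORT A =====
def checkLoop (perm : List Int) (cnt s n : Int) : Bool :=
  if hgt : 1 < n then
    let s' := if PySem.Int.mod n 2 ≠ 0 then s + 1 else s
    let n' := if PySem.Int.mod n 2 ≠ 0 then n - 1 else n
    if PySem.List.slice perm (some (cnt - PySem.Int.floordiv n' 2)) none =
       PySem.List.slice perm (some s') (some (s' + PySem.Int.floordiv n' 2)) then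
      true
    else
      checkLoop perm cnt (s' + 2) (n' - 2)
  else
    false
termination_by n.toNat
decreasing_by
  split <;> omega

def check (perm : List Int) (cnt : Int) : Bool :=
  checkLoop perm cnt 0 cnt

-- ===== PORT B =====
def hashMod : Int := 2305843009213693951
def hashBase : Int := 131

-- pref[i+1] = (pref[i]*BASE + x) % MOD, built left to right (the Python writes the
-- preallocated slots in this same order).
def prefStep (st : List Int × Int) (x : Int) : List Int × Int :=
  let v := PySem.Int.mod (st.2 * hashBase + x) hashMod
  (st.1 ++ [v], v)

def buildPref (perm : List Int) : List Int := (perm.foldl prefStep ([0], 0)).1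

-- pw[i+1] = pw[i]*BASE % MOD
def pwStep (st : List Int × Int) (_i : Nat) : List Int × Int :=
  let v := PySem.Int.mod (st.2 * hashBase) hashMod
  (st.1 ++ [v], v)

def buildPw (n : Nat) : List Int := ((List.range n).foldl pwStep ([1], 1)).1

-- hsh(i, j) = (pref[j] - pref[i]*pw[j-i]) % MOD  (list indexing; in range under Pre_check)
def hsh (pref pw : List Int) (i j : Int) : Int :=
  PySem.Int.mod (PySem.List.pyGetD pref j 0 - PySem.List.pyGetD pref i 0 * PySem.List.pyGetD pw (j - i) 0) hashMod

def check_alt (perm : List Int) (cnt : Int) : Bool :=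
  let n := perm.length
  let pref := buildPref perm
  let pw := buildPw n
  (PySem.List.pyRange 1 (PySem.Int.floordiv cnt 2 + 1) 1).any (fun h =>
    decide (hsh pref pw (cnt - h) (n : Int) = hsh pref pw (cnt - 2 * h) (cnt - h)) &&
    decide (PySem.List.slice perm (some (cnt - h)) none =
            PySem.List.slice perm (some (cnt - 2 * h)) (some (cnt - h))))

-- ===== PRECONDITION & SPEC =====
-- Pre_ excludes only cnt ≥ len(perm) + 2: there A's True comes from comparing two empty
-- out-of-range slices, while B's prefix-hash table indexing raises IndexError.
def Pre_check (perm : List Int) (cnt : Int) : Prop := cnt ≤ (perm.length : Int) + 1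
instance (perm : List Int) (cnt : Int) : Decidable (Pre_check perm cnt) := by unfold Pre_check; infer_instance
def pvWitness_check : List Int × Int := ([1, 2, 1, 2], 4)

def Spec_check (perm : List Int) (cnt : Int) (out : Bool) : Prop := out = check_alt perm cnt
instance (perm : List Int) (cnt : Int) (out : Bool) : Decidable (Spec_check perm cnt out) := by unfold Spec_check; infer_instance

-- ===== CLAIM (what is proved, stated in full; the proofs are below) =====
def Claim_equal_check : Prop := ∀ (perm : List Int) (cnt : Int), Dom_check perm cnt → Pre_check perm cnt → Spec_check perm cnt (check perm cnt)

-- ===== LEMMAS AND PROOFS =====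

-- A's loop, characterised: it compares perm[cnt-h:] with perm[cnt-2h:cnt-h] for each
-- half-length h = cnt//2, cnt//2 - 1, …, 1.
def goodA (perm : List Int) (cnt : Int) (h : Nat) : Bool :=
  decide (PySem.List.slice perm (some (cnt - h)) none =
          PySem.List.slice perm (some (cnt - 2 * h)) (some (cnt - h)))

def anyGoodA (perm : List Int) (cnt : Int) (m : Nat) : Bool :=
  (List.range m).any (fun i => goodA perm cnt (i + 1))

def phash (l : List Int) : Int :=
  l.foldl (fun acc x => PySem.Int.mod (acc * hashBase + x) hashMod) 0

def rawhash (l : List Int) : Int :=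
  l.foldl (fun acc x => acc * hashBase + x) 0

lemma hashMod_pos : (0:Int) < hashMod := by norm_num [hashMod]

lemma phash_append_single (l : List Int) (x : Int) :
    phash (l ++ [x]) = PySem.Int.mod (phash l * hashBase + x) hashMod := by
  simp [phash]

lemma rawhash_append_single (l : List Int) (x : Int) :
    rawhash (l ++ [x]) = rawhash l * hashBase + x := by
  simp [rawhash]

lemma phash_eq (l : List Int) : phash l = PySem.Int.mod (rawhash l) hashMod := by
  induction l using List.reverseRecOn with
  | nil => simp [phash, rawhash, PySem.Int.mod_eq_emod_of_pos hashMod_pos]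
  | append_singleton l x ih =>
      rw [phash_append_single, rawhash_append_single, ih,
          PySem.Int.mod_eq_emod_of_pos hashMod_pos, PySem.Int.mod_eq_emod_of_pos hashMod_pos,
          PySem.Int.mod_eq_emod_of_pos hashMod_pos]
      conv_lhs => rw [Int.add_emod, Int.mul_emod, Int.emod_emod_of_dvd _ dvd_rfl]
      conv_rhs => rw [Int.add_emod, Int.mul_emod]

lemma rawhash_append (u v : List Int) :
    rawhash (u ++ v) = rawhash u * hashBase ^ v.length + rawhash v := by
  induction v using List.reverseRecOn with
  | nil => simp [rawhash]
  | append_singleton v y ih =>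
      rw [show u ++ (v ++ [y]) = (u ++ v) ++ [y] by simp,
          rawhash_append_single, rawhash_append_single, ih]
      simp [pow_succ]; ring

lemma emod_base (x : Int) : x % hashMod ≡ x [ZMOD hashMod] := Int.emod_emod_of_dvd x dvd_rfl

lemma buildPref_state (perm : List Int) :
    perm.foldl prefStep ([0], 0) =
      ((List.range (perm.length + 1)).map (fun k => phash (perm.take k)), phash perm) := by
  induction perm using List.reverseRecOn with
  | nil => simp [phash, List.range_succ]
  | append_singleton l x ih =>
      rw [List.foldl_append, ih]
      simp only [prefStep, List.foldl_cons, List.foldl_nil]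
      rw [Prod.mk.injEq]
      constructor
      · rw [List.length_append, List.length_singleton, List.range_succ (n := l.length + 1),
            List.map_append]
        congr 1
        · apply List.map_congr_left
          intro k hk
          rw [List.mem_range] at hk
          rw [List.take_append_of_le_length (by omega)]
        · have ht : (l ++ [x]).take (l.length + 1) = l ++ [x] :=
            List.take_of_length_le (by simp)
          simp [ht, ← phash_append_single]
      · rw [← phash_append_single]

lemma buildPw_state (n : Nat) :
    (List.range n).foldl pwStep ([1], 1) =
      ((List.range (n + 1)).map (fun k => PySem.Int.mod (hashBase ^ k) hashMod),
       PySem.Int.mod (hashBase ^ n) hashMod) := by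
  induction n with
  | zero =>
      norm_num [List.range_succ, PySem.Int.mod_eq_emod_of_pos hashMod_pos, hashMod]
  | succ n ih =>
      rw [List.range_succ, List.foldl_append, ih]
      simp only [pwStep, List.foldl_cons, List.foldl_nil]
      rw [Prod.mk.injEq]
      have hp : PySem.Int.mod (PySem.Int.mod (hashBase ^ n) hashMod * hashBase) hashMod
          = PySem.Int.mod (hashBase ^ (n + 1)) hashMod := by
        rw [PySem.Int.mod_eq_emod_of_pos hashMod_pos, PySem.Int.mod_eq_emod_of_pos hashMod_pos,
            PySem.Int.mod_eq_emod_of_pos hashMod_pos, pow_succ]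
        conv_lhs => rw [Int.mul_emod, Int.emod_emod_of_dvd _ dvd_rfl]
        conv_rhs => rw [Int.mul_emod]
      constructor
      · rw [List.range_succ (n := n + 1), List.map_append]
        simp [hp]
      · exact hp

lemma pref_get (perm : List Int) (k : Nat) (hk : k ≤ perm.length) :
    PySem.List.pyGetD (buildPref perm) (k : Int) 0
      = PySem.Int.mod (rawhash (perm.take k)) hashMod := by
  rw [buildPref, buildPref_state, ← phash_eq]
  have hk' : k < (List.range (perm.length + 1)).length := by simp; omega
  rw [PySem.List.pyGetD_natCast,
      List.getD_eq_getElem _ 0 (by simpa using hk'), List.getElem_map, List.getElem_range]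

lemma pw_get (n : Nat) (k : Nat) (hk : k ≤ n) :
    PySem.List.pyGetD (buildPw n) (k : Int) 0 = PySem.Int.mod (hashBase ^ k) hashMod := by
  rw [buildPw, buildPw_state]
  have hk' : k < (List.range (n + 1)).length := by simp; omega
  rw [PySem.List.pyGetD_natCast,
      List.getD_eq_getElem _ 0 (by simpa using hk'), List.getElem_map, List.getElem_range]

lemma hsh_spec (perm : List Int) (i j : Nat) (hij : i ≤ j) (hj : j ≤ perm.length) :
    hsh (buildPref perm) (buildPw perm.length) (i : Int) (j : Int)
      = PySem.Int.mod (rawhash ((perm.drop i).take (j - i))) hashMod := by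
  have hsplit : perm.take j = perm.take i ++ (perm.drop i).take (j - i) := by
    rw [← List.take_add]
    congr 1
    omega
  have hlenmid : ((perm.drop i).take (j - i)).length = j - i := by
    simp [List.length_take, List.length_drop]; omega
  have hcast : (j : Int) - (i : Int) = ((j - i : Nat) : Int) := by omega
  unfold hsh
  rw [hcast, pref_get perm j hj, pref_get perm i (by omega), pw_get perm.length (j - i) (by omega)]
  rw [PySem.Int.mod_eq_emod_of_pos hashMod_pos, PySem.Int.mod_eq_emod_of_pos hashMod_pos,
      PySem.Int.mod_eq_emod_of_pos hashMod_pos, PySem.Int.mod_eq_emod_of_pos hashMod_pos,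
      PySem.Int.mod_eq_emod_of_pos hashMod_pos]
  have hval : rawhash (perm.take j)
      - rawhash (perm.take i) * hashBase ^ (j - i) = rawhash ((perm.drop i).take (j - i)) := by
    rw [hsplit, rawhash_append, hlenmid]
    ring
  calc ((rawhash (perm.take j)) % hashMod
        - (rawhash (perm.take i)) % hashMod * ((hashBase ^ (j - i)) % hashMod)) % hashMod
      = (rawhash (perm.take j)
        - rawhash (perm.take i) * hashBase ^ (j - i)) % hashMod := by
        exact Int.ModEq.sub (emod_base _) (Int.ModEq.mul (emod_base _) (emod_base _))
    _ = (rawhash ((perm.drop i).take (j - i))) % hashMod := by rw [hval]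

lemma checkLoop_eq (perm : List Int) (cnt : Int) :
    ∀ (s n : Int), s = cnt - n →
    checkLoop perm cnt s n = anyGoodA perm cnt ((PySem.Int.floordiv n 2).toNat) := by
  intro s n
  fun_induction checkLoop perm cnt s n with
  | case1 s n hgt s' n' hcmp =>
      intro hs
      have hm2 : PySem.Int.mod n 2 = n % 2 := PySem.Int.mod_eq_emod_of_pos (by norm_num)
      have hs'' : s' = if PySem.Int.mod n 2 ≠ 0 then s + 1 else s := rfl
      have hn'' : n' = if PySem.Int.mod n 2 ≠ 0 then n - 1 else n := rfl
      have hfd : PySem.Int.floordiv n' 2 = n' / 2 := PySem.Int.floordiv_eq_ediv_of_pos (by norm_num)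
      have hfd0 : PySem.Int.floordiv n 2 = n / 2 := PySem.Int.floordiv_eq_ediv_of_pos (by norm_num)
      set h0 : Nat := (PySem.Int.floordiv n 2).toNat with hh0
      have h0pos : 1 ≤ h0 := by rw [hh0, hfd0]; omega
      have e1 : cnt - PySem.Int.floordiv n' 2 = cnt - (h0 : Int) := by
        rw [hfd, hn'']; rw [hfd0] at hh0; split_ifs with hp <;> rw [hm2] at hp <;> omega
      have e2 : s' = cnt - 2 * (h0 : Int) := by
        rw [hs'', hn''] at *; rw [hfd0] at hh0; split_ifs with hp <;> rw [hm2] at hp <;> omega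
      have e3 : s' + PySem.Int.floordiv n' 2 = cnt - (h0 : Int) := by
        rw [hfd, hn'', hs'']; rw [hfd0] at hh0; split_ifs with hp <;> rw [hm2] at hp <;> omega
      rw [e1, e3, e2] at hcmp
      have hg : goodA perm cnt h0 = true := by
        simp only [goodA, decide_eq_true_eq]; exact hcmp
      have : anyGoodA perm cnt h0 = true := by
        apply List.any_eq_true.mpr
        exact ⟨h0 - 1, List.mem_range.mpr (by omega), by rw [show h0 - 1 + 1 = h0 from by omega]; exact hg⟩
      exact this.symm
  | case2 s n hgt s' n' hcmp ih =>
      intro hs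
      have hm2 : PySem.Int.mod n 2 = n % 2 := PySem.Int.mod_eq_emod_of_pos (by norm_num)
      have hs'' : s' = if PySem.Int.mod n 2 ≠ 0 then s + 1 else s := rfl
      have hn'' : n' = if PySem.Int.mod n 2 ≠ 0 then n - 1 else n := rfl
      have hfd : PySem.Int.floordiv n' 2 = n' / 2 := PySem.Int.floordiv_eq_ediv_of_pos (by norm_num)
      have hfd0 : PySem.Int.floordiv n 2 = n / 2 := PySem.Int.floordiv_eq_ediv_of_pos (by norm_num)
      have hfd2 : PySem.Int.floordiv (n' - 2) 2 = (n' - 2) / 2 := PySem.Int.floordiv_eq_ediv_of_pos (by norm_num)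
      set h0 : Nat := (PySem.Int.floordiv n 2).toNat with hh0
      have h0pos : 1 ≤ h0 := by rw [hh0, hfd0]; omega
      have e1 : cnt - PySem.Int.floordiv n' 2 = cnt - (h0 : Int) := by
        rw [hfd, hn'']; rw [hfd0] at hh0; split_ifs with hp <;> rw [hm2] at hp <;> omega
      have e2 : s' = cnt - 2 * (h0 : Int) := by
        rw [hs'', hn''] at *; rw [hfd0] at hh0; split_ifs with hp <;> rw [hm2] at hp <;> omega
      have e3 : s' + PySem.Int.floordiv n' 2 = cnt - (h0 : Int) := by
        rw [hfd, hn'', hs'']; rw [hfd0] at hh0; split_ifs with hp <;> rw [hm2] at hp <;> omega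
      rw [e1, e3, e2] at hcmp
      have hg : goodA perm cnt h0 = false := by
        simp only [goodA, decide_eq_false_iff_not]; exact hcmp
      have hinv : s' + 2 = cnt - (n' - 2) := by
        rw [hs'', hn'']; split_ifs with hp <;> rw [hm2] at hp <;> omega
      rw [ih hinv]
      have hidx : (PySem.Int.floordiv (n' - 2) 2).toNat = h0 - 1 := by
        rw [hfd2, hn'']; rw [hfd0] at hh0; split_ifs with hp <;> rw [hm2] at hp <;> omega
      rw [hidx]
      conv_rhs => rw [show h0 = (h0 - 1) + 1 from by omega]
      simp only [anyGoodA, List.range_succ, List.any_append, List.any_cons, List.any_nil]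
      rw [show h0 - 1 + 1 = h0 from by omega, hg]
      simp
  | case3 s n hgt =>
      intro _
      have hfd0 : PySem.Int.floordiv n 2 = n / 2 := PySem.Int.floordiv_eq_ediv_of_pos (by norm_num)
      have : (PySem.Int.floordiv n 2).toNat = 0 := by omega
      rw [this]
      rfl

lemma any_congr_mem {α : Type} (l : List α) (p q : α → Bool)
    (h : ∀ x ∈ l, p x = q x) : l.any p = l.any q := by
  induction l with
  | nil => rfl
  | cons x t ih =>
      simp only [List.any_cons, h x (by simp), ih fun y hy => h y (by simp [hy])]

-- the slice comparison implies the hash comparison (so the hash filter never loses a hit)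
lemma slice_imp_hsh (perm : List Int) (cnt : Int) (h : Nat) (h1 : 1 ≤ h)
    (h2 : 2 * (h : Int) ≤ cnt) (hpre : cnt ≤ (perm.length : Int) + 1)
    (hS : PySem.List.slice perm (some (cnt - h)) none =
          PySem.List.slice perm (some (cnt - 2 * h)) (some (cnt - h))) :
    hsh (buildPref perm) (buildPw perm.length) (cnt - h) (perm.length : Int)
      = hsh (buildPref perm) (buildPw perm.length) (cnt - 2 * h) (cnt - h) := by
  set n := perm.length with hn
  have ha0 : (0:Int) ≤ cnt - h := by omega
  have hb0 : (0:Int) ≤ cnt - 2 * h := by omega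
  rw [PySem.List.slice_from _ ha0, PySem.List.slice_toNat _ hb0 ha0] at hS
  set a := (cnt - h).toNat with hadef
  set b := (cnt - 2 * h).toNat with hbdef
  have hab : a - b = h := by omega
  -- equal lists have equal lengths, which forces cnt = n
  have hlen := congrArg List.length hS
  simp only [List.length_drop, List.length_take] at hlen
  have hcn : cnt = (n : Int) := by omega
  have han : a ≤ n := by omega
  have hba : b ≤ a := by omega
  have e1 : cnt - (h : Int) = (a : Int) := by omega
  have e2 : cnt - 2 * (h : Int) = (b : Int) := by omega
  rw [e1, e2, hsh_spec perm a n han (le_refl n), hsh_spec perm b a hba han]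
  have hwhole : (perm.drop a).take (n - a) = perm.drop a := by
    apply List.take_of_length_le
    simp only [List.length_drop]
    omega
  rw [hwhole, hS, hab]

-- ===== VERDICT (by name: the statement is the Claim_ definition above) =====
theorem check_spec : Claim_equal_check := by
  unfold Claim_equal_check
  intro perm cnt _ hpre
  unfold Spec_check
  have hpre' : cnt ≤ (perm.length : Int) + 1 := hpre
  have hA : check perm cnt = anyGoodA perm cnt ((PySem.Int.floordiv cnt 2).toNat) := by
    unfold check
    exact checkLoop_eq perm cnt 0 cnt (by ring)
  have hfd : PySem.Int.floordiv cnt 2 = cnt / 2 := PySem.Int.floordiv_eq_ediv_of_pos (by norm_num)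
  rw [hA]
  unfold check_alt
  rw [PySem.List.pyRange_one, List.any_map]
  have hm : (PySem.Int.floordiv cnt 2 + 1 - 1).toNat = (PySem.Int.floordiv cnt 2).toNat := by
    omega
  rw [hm]
  unfold anyGoodA
  apply any_congr_mem
  intro k hk
  rw [List.mem_range] at hk
  simp only [Function.comp]
  have ec1 : cnt - (1 + (k : Int)) = cnt - ((k + 1 : Nat) : Int) := by push_cast; ring
  have ec2 : cnt - 2 * (1 + (k : Int)) = cnt - 2 * ((k + 1 : Nat) : Int) := by push_cast; ring
  rw [ec1, ec2]
  have hh1 : 1 ≤ k + 1 := by omega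
  have hh2 : 2 * ((k + 1 : Nat) : Int) ≤ cnt := by
    have : ((k:Int)) + 1 ≤ PySem.Int.floordiv cnt 2 := by omega
    omega
  unfold goodA
  by_cases hS : PySem.List.slice perm (some (cnt - ((k + 1 : Nat) : Int))) none =
      PySem.List.slice perm (some (cnt - 2 * ((k + 1 : Nat) : Int)))
        (some (cnt - ((k + 1 : Nat) : Int)))
  · have hH := slice_imp_hsh perm cnt (k + 1) hh1 hh2 hpre' hS
    rw [decide_eq_true hS, decide_eq_true hH]
    rfl
  · rw [decide_eq_false hS, Bool.and_false]
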